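-- pv_equiv track=rewrite | github.com/bigcaole/sb-bot-panel | tests/test_bot_callback_coverage.py | _regex_literal_prefix
-- ===== SOURCE A (Python) =====
-- from typing import List, Set
--
-- def _regex_literal_prefix(pattern: str) -> str:
--     text = pattern[1:] if pattern.startswith("^") else pattern
--     out: List[str] = []
--     meta = set(".^$*+?{}[]|()\\")
--     for ch in text:
--         if ch in meta:
--             break
--         out.append(ch)
--     return "".join(out)
-- ===== SOURCE B (Python) =====
-- def _regex_literal_prefix(pattern: str) -> str:
--     text = pattern[1:] if pattern.startswith("^") else pattern
--     cut = len(text)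
--     for m in ".^$*+?{}[]|()\\":
--         i = text.find(m)
--         if i != -1 and i < cut:
--             cut = i
--     return text[:cut]
-- ===== Notes on version B (the rewrite author's own statement) =====
-- stated objective: faster
-- what changed: Instead of scanning the text character by character with a per-character set-membership test and an accumulator list, B computes for each of the 13 metacharacters its first occurrence via str.find, keeps the minimum such index, and returns a single slice text[:cut].
import Mathlib
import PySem

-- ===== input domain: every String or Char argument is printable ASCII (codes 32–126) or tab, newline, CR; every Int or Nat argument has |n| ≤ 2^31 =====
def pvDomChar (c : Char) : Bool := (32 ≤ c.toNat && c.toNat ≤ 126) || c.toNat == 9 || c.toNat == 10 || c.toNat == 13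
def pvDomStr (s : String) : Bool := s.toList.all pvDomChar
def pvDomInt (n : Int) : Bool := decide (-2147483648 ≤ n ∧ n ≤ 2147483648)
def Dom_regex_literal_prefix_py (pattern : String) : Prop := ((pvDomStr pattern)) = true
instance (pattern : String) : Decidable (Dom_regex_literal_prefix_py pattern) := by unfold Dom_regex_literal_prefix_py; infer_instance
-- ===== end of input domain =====

-- B replaces A's per-character scan-and-accumulate loop by one str.find per metacharacter,
-- keeping the minimum hit index, and returns a single slice (same exact result; the timing
-- run measured B faster).

-- the 14 characters of the Python literal ".^$*+?{}[]|()\\" (shared constant of both programs)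
def pvMetaL : List Char := ".^$*+?{}[]|()\\".toList

-- ===== PORT A =====
-- the for-loop of A: walks the text, appending to `out` until a meta character is hit
def pvAGo (metaS : PySem.Set Char) : List Char → List Char → List Char
  | out, [] => out
  | out, ch :: rest => if ch ∈ metaS then out else pvAGo metaS (out ++ [ch]) rest

def regex_literal_prefix_py (pattern : String) : String :=
  let text := if PySem.Str.startswith pattern "^" then PySem.Str.slice pattern (some 1) none else pattern
  let metaS := PySem.Set.ofList pvMetaL
  String.ofList (pvAGo metaS [] text.toList)

-- ===== PORT B =====
def regex_literal_prefix_py_alt (pattern : String) : String :=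
  let text := if PySem.Str.startswith pattern "^" then PySem.Str.slice pattern (some 1) none else pattern
  let cut := pvMetaL.foldl
      (fun cut m =>
        let i := PySem.Str.find text (String.ofList [m])
        if i ≠ -1 ∧ i < cut then i else cut)
      (PySem.Str.len text)
  PySem.Str.slice text none (some cut)

-- ===== PRECONDITION & SPEC =====
def Spec_regex_literal_prefix_py (pattern : String) (out : String) : Prop := out = regex_literal_prefix_py_alt pattern
instance (pattern : String) (out : String) : Decidable (Spec_regex_literal_prefix_py pattern out) := by unfold Spec_regex_literal_prefix_py; infer_instance

-- ===== CLAIM (what is proved, stated in full; the proofs are below) =====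
def Claim_equal_regex_literal_prefix_py : Prop := ∀ (pattern : String), Dom_regex_literal_prefix_py pattern → Spec_regex_literal_prefix_py pattern (regex_literal_prefix_py pattern)

-- ===== LEMMAS AND PROOFS =====

-- keep predicate: the characters A's loop copies (not a metacharacter)
def pvKeep (c : Char) : Bool := !(pvMetaL.contains c)

-- A's loop is takeWhile of the keep predicate
theorem pvAGo_eq_takeWhile (t : List Char) : ∀ out : List Char,
    pvAGo (PySem.Set.ofList pvMetaL) out t = out ++ t.takeWhile pvKeep := by
  induction t with
  | nil => intro out; simp [pvAGo]
  | cons c rest ih =>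
    intro out
    by_cases h : c ∈ PySem.Set.ofList pvMetaL
    · have hm : c ∈ pvMetaL := (PySem.Set.mem_ofList pvMetaL c).mp h
      have hk : pvKeep c = false := by
        simp [pvKeep, hm]
      simp [pvAGo, h, hk]
    · have hm : c ∉ pvMetaL := fun hc => h ((PySem.Set.mem_ofList pvMetaL c).mpr hc)
      have hk : pvKeep c = true := by
        simp [pvKeep, hm]
      simp [pvAGo, h, hk, ih]

-- singleton prefix = head
theorem pvSingleton_prefix (m : Char) (l : List Char) : [m] <+: l ↔ l.head? = some m := by
  cases l with
  | nil => simp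
  | cons a l' =>
    constructor
    · rintro ⟨t, ht⟩
      simp at ht
      simp [ht.1]
    · intro h
      simp at h
      exact ⟨l', by simp [h]⟩

-- find of a single character: specification extracted from the PySem findFrom spec
theorem pvFind_ne_neg_one_of_mem (t : List Char) (m : Char) (h : m ∈ t) :
    PySem.Chars.find t [m] ≠ -1 := by
  intro hEq
  have h0 : (0 : ℕ) ≤ t.length := Nat.zero_le _
  have := (PySem.Chars.findFrom_natCast_eq_neg_one_iff t [m] 0 h0)
  rw [Nat.cast_zero, PySem.Chars.findFrom_zero] at this
  have hinf : ¬ ([m] <:+: t.drop 0) := this.mp hEq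
  apply hinf
  obtain ⟨s₁, s₂, hs⟩ := List.append_of_mem h
  exact ⟨s₁, s₂, by simp [hs]⟩

theorem pvFind_spec (t : List Char) (m : Char) (h : PySem.Chars.find t [m] ≠ -1) :
    0 ≤ PySem.Chars.find t [m] ∧
    t[(PySem.Chars.find t [m]).toNat]? = some m ∧
    ∀ i : ℕ, i < (PySem.Chars.find t [m]).toNat → t[i]? ≠ some m := by
  have h0 : (0 : ℕ) ≤ t.length := Nat.zero_le _
  have hspec := PySem.Chars.findFrom_natCast_spec t [m] 0 h0
  rw [Nat.cast_zero, PySem.Chars.findFrom_zero] at hspec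
  have hspec := hspec h
  obtain ⟨h1, h2, h3⟩ := hspec
  refine ⟨by exact_mod_cast h1, ?_, ?_⟩
  · have := (pvSingleton_prefix m _).mp h2
    rw [List.head?_drop] at this
    exact this
  · intro i hi hsome
    apply h3 i (Nat.zero_le i) hi
    rw [pvSingleton_prefix, List.head?_drop]
    exact hsome

-- the fold of B: abstract step
def pvStep (t : List Char) (cut : Int) (m : Char) : Int :=
  if PySem.Chars.find t [m] ≠ -1 ∧ PySem.Chars.find t [m] < cut then PySem.Chars.find t [m] else cut

theorem pvFold_spec (t : List Char) : ∀ (ms : List Char) (c0 : Int),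
    (ms.foldl (pvStep t) c0 ≤ c0) ∧
    (ms.foldl (pvStep t) c0 = c0 ∨
      ∃ m ∈ ms, ms.foldl (pvStep t) c0 = PySem.Chars.find t [m] ∧ PySem.Chars.find t [m] ≠ -1) ∧
    (∀ m ∈ ms, PySem.Chars.find t [m] ≠ -1 → ms.foldl (pvStep t) c0 ≤ PySem.Chars.find t [m]) := by
  intro ms
  induction ms with
  | nil => intro c0; simp
  | cons m ms ih =>
    intro c0
    have hstep : pvStep t c0 m ≤ c0 ∧
        (pvStep t c0 m = c0 ∨ (pvStep t c0 m = PySem.Chars.find t [m] ∧ PySem.Chars.find t [m] ≠ -1)) ∧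
        (PySem.Chars.find t [m] ≠ -1 → pvStep t c0 m ≤ PySem.Chars.find t [m]) := by
      unfold pvStep
      by_cases hc : PySem.Chars.find t [m] ≠ -1 ∧ PySem.Chars.find t [m] < c0
      · rw [if_pos hc]
        exact ⟨le_of_lt hc.2, Or.inr ⟨rfl, hc.1⟩, fun _ => le_refl _⟩
      · rw [if_neg hc]
        refine ⟨le_refl _, Or.inl rfl, fun hne => ?_⟩
        rcases not_and_or.mp hc with h' | h'
        · exact absurd hne h'
        · exact le_of_not_gt (fun hgt => h' hgt)
    obtain ⟨ihle, ihor, ihall⟩ := ih (pvStep t c0 m)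
    refine ⟨?_, ?_, ?_⟩
    · simp only [List.foldl_cons]; exact le_trans ihle hstep.1
    · simp only [List.foldl_cons]
      rcases ihor with h | ⟨m', hm', h1, h2⟩
      · rcases hstep.2.1 with h' | ⟨h1', h2'⟩
        · exact Or.inl (h.trans h')
        · exact Or.inr ⟨m, List.mem_cons_self, h.trans h1', h2'⟩
      · exact Or.inr ⟨m', List.mem_cons_of_mem _ hm', h1, h2⟩
    · intro m' hm' hne
      simp only [List.foldl_cons]
      rcases List.mem_cons.mp hm' with rfl | hmem
      · exact le_trans ihle (hstep.2.2 hne)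
      · exact ihall m' hmem hne

-- takeWhile characterizations
theorem pvTW_mem (p : Char → Bool) : ∀ (t : List Char) (j : ℕ), j < (t.takeWhile p).length →
    ∀ c, t[j]? = some c → p c = true := by
  intro t
  induction t with
  | nil => intro j hj; simp at hj
  | cons a l ih =>
    intro j hj c hc
    by_cases hp : p a
    · cases j with
      | zero => simp at hc; subst hc; exact hp
      | succ j' =>
        simp [hp] at hj
        exact ih j' (by omega) c (by simpa using hc)
    · simp [hp] at hj
theorem pvTW_stop (p : Char → Bool) : ∀ (t : List Char), (t.takeWhile p).length < t.length →
    ∀ c, t[(t.takeWhile p).length]? = some c → p c = false := by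
  intro t
  induction t with
  | nil => intro h; simp at h
  | cons a l ih =>
    intro hlt c hc
    by_cases hp : p a
    · simp [hp] at hlt hc ⊢
      exact ih (by omega) c hc
    · simp [hp] at hc
      subst hc
      simpa using hp

theorem pvTW_len_le (p : Char → Bool) (t : List Char) : (t.takeWhile p).length ≤ t.length :=
  (List.takeWhile_prefix p).length_le

-- the computed cut equals the length of the takeWhile prefix
theorem pvCut_eq (t : List Char) :
    pvMetaL.foldl (pvStep t) (t.length : Int) = ((t.takeWhile pvKeep).length : Int) := by
  obtain ⟨hle, hor, hall⟩ := pvFold_spec t pvMetaL (t.length : Int)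
  set r := pvMetaL.foldl (pvStep t) (t.length : Int) with hr
  set L := (t.takeWhile pvKeep).length with hL
  have hLlen : L ≤ t.length := pvTW_len_le pvKeep t
  -- 0 ≤ r
  have hr0 : 0 ≤ r := by
    rcases hor with h | ⟨m, _, h1, h2⟩
    · rw [h]; exact_mod_cast Nat.zero_le _
    · rw [h1]; exact (pvFind_spec t m h2).1
  -- r ≤ L
  have hrL : r ≤ (L : Int) := by
    by_cases hcase : L < t.length
    · obtain ⟨c, hc⟩ : ∃ c, t[L]? = some c := by
        have := List.getElem?_eq_getElem (l := t) (i := L) hcase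
        exact ⟨t[L], this⟩
      have hpc : pvKeep c = false := pvTW_stop pvKeep t hcase c hc
      have hmem : c ∈ pvMetaL := by
        simpa [pvKeep, List.contains_iff_mem] using hpc
      have hne : PySem.Chars.find t [c] ≠ -1 := by
        apply pvFind_ne_neg_one_of_mem
        exact List.mem_of_getElem? hc
      have hmin := (pvFind_spec t c hne).2.2
      -- find t [c] ≤ L : otherwise L < toNat and the occurrence at L contradicts minimality
      have hfle : PySem.Chars.find t [c] ≤ (L : Int) := by
        by_contra hgt
        push Not at hgt
        have h0 : 0 ≤ PySem.Chars.find t [c] := (pvFind_spec t c hne).1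
        have : L < (PySem.Chars.find t [c]).toNat := by omega
        exact hmin L this hc
      exact le_trans (hall c hmem hne) hfle
    · have : L = t.length := by omega
      rw [this]; exact hle
  -- L ≤ r
  have hLr : (L : Int) ≤ r := by
    by_contra hlt
    push Not at hlt
    have hrn : r.toNat < L := by omega
    have hrlen : r.toNat < t.length := by omega
    obtain ⟨c, hc⟩ : ∃ c, t[r.toNat]? = some c := by
      have := List.getElem?_eq_getElem (l := t) (i := r.toNat) hrlen
      exact ⟨t[r.toNat], this⟩
    have hpc : pvKeep c = true := pvTW_mem pvKeep t r.toNat hrn c hc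
    -- but r comes from a find, whose hit is a metacharacter
    rcases hor with h | ⟨m, hmML, h1, h2⟩
    · omega
    · have hhit : t[(PySem.Chars.find t [m]).toNat]? = some m := (pvFind_spec t m h2).2.1
      rw [← h1] at hhit
      rw [hhit] at hc
      have : m = c := by injection hc
      subst this
      simp [pvKeep, hmML] at hpc
  omega

-- core string-level equality, for the common `text`
theorem pvCore (s : String) :
    String.ofList (pvAGo (PySem.Set.ofList pvMetaL) [] s.toList) =
      PySem.Str.slice s none (some (pvMetaL.foldl
        (fun cut m =>
          let i := PySem.Str.find s (String.ofList [m])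
          if i ≠ -1 ∧ i < cut then i else cut)
        (PySem.Str.len s))) := by
  have hfold : pvMetaL.foldl
      (fun cut m =>
        let i := PySem.Str.find s (String.ofList [m])
        if i ≠ -1 ∧ i < cut then i else cut)
      (PySem.Str.len s) = pvMetaL.foldl (pvStep s.toList) ((s.toList.length : ℕ) : Int) := by
    rw [PySem.Str.len_eq]
    congr 1
    funext cut m
    simp [pvStep, PySem.Str.find_eq, String.toList_ofList]
  rw [hfold, pvCut_eq]
  apply String.ext
  rw [PySem.Str.toList_slice, String.toList_ofList, pvAGo_eq_takeWhile, List.nil_append]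
  simp only [PySem.Chars.slice, PySem.List.slice_to_natCast]
  exact (List.prefix_iff_eq_take.mp (List.takeWhile_prefix pvKeep))

-- ===== VERDICT (by name: the statement is the Claim_ definition above) =====
theorem regex_literal_prefix_py_spec : Claim_equal_regex_literal_prefix_py := by
  intro pattern _
  unfold Spec_regex_literal_prefix_py regex_literal_prefix_py regex_literal_prefix_py_alt
  exact pvCore _
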